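-- pv_equiv track=rewrite | github.com/User129863/plasticity-blender-addon-gamedev | handler.py | _compress_loop_face_ids
-- ===== SOURCE A (Python) =====
-- def _compress_loop_face_ids(loop_face_ids):
--     groups_out = []
--     face_ids_out = []
--     current_id = None
--     start = 0
--     count = 0
--     for loop_index, face_id in enumerate(loop_face_ids):
--         if face_id is None or face_id < 0:
--             if current_id is not None:
--                 groups_out.extend([start, count])
--                 face_ids_out.append(current_id)
--                 current_id = None
--                 count = 0
--             continue
--         if current_id is None:
--             current_id = face_id
--             start = loop_index
--             count = 1
--         elif face_id == current_id:
--             count += 1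
--         else:
--             groups_out.extend([start, count])
--             face_ids_out.append(current_id)
--             current_id = face_id
--             start = loop_index
--             count = 1
--
--     if current_id is not None:
--         groups_out.extend([start, count])
--         face_ids_out.append(current_id)
--
--     return groups_out, face_ids_out
-- ===== SOURCE B (Python) =====
-- def _compress_loop_face_ids(loop_face_ids):
--     groups_out = []
--     face_ids_out = []
--     n = len(loop_face_ids)
--     i = 0
--     while i < n:
--         fid = loop_face_ids[i]
--         if fid is None or fid < 0:
--             i += 1
--             continue
--         j = i + 1
--         while j < n and loop_face_ids[j] == fid:
--             j += 1
--         groups_out += [i, j - i]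
--         face_ids_out.append(fid)
--         i = j
--     return groups_out, face_ids_out
-- ===== Notes on version B (the rewrite author's own statement) =====
-- stated objective: alternative
-- what changed: Replaces A's one-pass state machine (current_id/start/count with deferred flushes) by a two-pointer run scanner that finds each run's end with an inner scan and emits it immediately.
import Mathlib
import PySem

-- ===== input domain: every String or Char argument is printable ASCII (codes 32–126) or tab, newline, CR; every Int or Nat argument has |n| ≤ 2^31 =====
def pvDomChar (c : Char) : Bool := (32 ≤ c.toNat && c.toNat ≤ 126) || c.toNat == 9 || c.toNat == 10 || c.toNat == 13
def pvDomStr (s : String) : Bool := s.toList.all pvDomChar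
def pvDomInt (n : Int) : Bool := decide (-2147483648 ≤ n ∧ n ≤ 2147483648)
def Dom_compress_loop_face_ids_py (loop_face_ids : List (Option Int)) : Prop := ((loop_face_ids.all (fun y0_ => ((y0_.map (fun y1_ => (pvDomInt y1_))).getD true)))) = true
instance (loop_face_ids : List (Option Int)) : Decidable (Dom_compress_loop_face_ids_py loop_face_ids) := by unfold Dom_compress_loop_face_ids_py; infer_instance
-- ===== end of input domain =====

-- B replaces A's one-pass state machine (current_id/start/count with deferred flushes)
-- by a two-pointer run scanner that finds each run's end and emits it at once (alternative; same cost).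

-- ===== PORT A =====
-- loop body of A: state is (groups_out, face_ids_out, current_id, start, count)
def pvAStep (st : List Int × List Int × Option Int × Int × Int) (p : Int × Option Int) :
    List Int × List Int × Option Int × Int × Int :=
  match st, p with
  | (g, f, cur, start, count), (i, fid) =>
    match fid with
    | none =>
      match cur with
      | none => (g, f, none, start, count)
      | some c => (g ++ [start, count], f ++ [c], none, start, 0)
    | some v =>
      if v < 0 then
        match cur with
        | none => (g, f, none, start, count)
        | some c => (g ++ [start, count], f ++ [c], none, start, 0)
      else
        match cur with
        | none => (g, f, some v, i, 1)
        | some c =>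
          if v = c then (g, f, some c, start, count + 1)
          else (g ++ [start, count], f ++ [c], some v, i, 1)

-- final flush after the loop
def pvAFin (st : List Int × List Int × Option Int × Int × Int) : List Int × List Int :=
  match st with
  | (g, f, none, _, _) => (g, f)
  | (g, f, some c, start, count) => (g ++ [start, count], f ++ [c])

def compress_loop_face_ids_py (loop_face_ids : List (Option Int)) : List Int × List Int :=
  pvAFin ((PySem.List.enumerate loop_face_ids 0).foldl pvAStep ([], [], none, 0, 0))

-- ===== PORT B =====
-- two-pointer scanner of Source B: skip sentinels, scan the run, emit [i, j-i] and fid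
def pvBGo (i : Int) : List (Option Int) → List Int × List Int
  | [] => ([], [])
  | none :: rest => pvBGo (i + 1) rest
  | some v :: rest =>
    if v < 0 then pvBGo (i + 1) rest
    else
      let run := rest.takeWhile (fun x => x == some v)
      let j : Int := i + 1 + (run.length : Int)
      let (g, f) := pvBGo j (rest.dropWhile (fun x => x == some v))
      (i :: (j - i) :: g, v :: f)
  termination_by xs => xs.length
  decreasing_by
    · simp
    · simp
    · simpa using Nat.lt_succ_of_le (List.length_dropWhile_le _ _)

def compress_loop_face_ids_py_alt (loop_face_ids : List (Option Int)) : List Int × List Int :=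
  pvBGo 0 loop_face_ids

-- ===== PRECONDITION & SPEC =====
def Spec_compress_loop_face_ids_py (loop_face_ids : List (Option Int)) (out : List Int × List Int) : Prop := out = compress_loop_face_ids_py_alt loop_face_ids
instance (loop_face_ids : List (Option Int)) (out : List Int × List Int) : Decidable (Spec_compress_loop_face_ids_py loop_face_ids out) := by unfold Spec_compress_loop_face_ids_py; infer_instance

-- ===== CLAIM (what is proved, stated in full; the proofs are below) =====
def Claim_equal_compress_loop_face_ids_py : Prop := ∀ (loop_face_ids : List (Option Int)), Dom_compress_loop_face_ids_py loop_face_ids → Spec_compress_loop_face_ids_py loop_face_ids (compress_loop_face_ids_py loop_face_ids)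

-- ===== LEMMAS AND PROOFS =====

-- Combined loop invariant: (1) from an idle state the fold produces exactly B's scan;
-- (2) from an active run (current id cid ≥ 0, already `count` long, started at `start`)
--     it finishes the run as B's takeWhile would and continues as B does.
theorem pvBGo_none (i : Int) (t : List (Option Int)) : pvBGo i (none :: t) = pvBGo (i + 1) t := by
  simp [pvBGo]

theorem pvBGo_sneg {v : Int} (hv : v < 0) (i : Int) (t : List (Option Int)) :
    pvBGo i (some v :: t) = pvBGo (i + 1) t := by
  simp [pvBGo, hv]

theorem pv_main (rest : List (Option Int)) :
    (∀ (g f : List Int) (s c i : Int),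
      pvAFin ((PySem.List.enumerate rest i).foldl pvAStep (g, f, none, s, c)) =
        (g ++ (pvBGo i rest).1, f ++ (pvBGo i rest).2)) ∧
    (∀ (g f : List Int) (cid start count i : Int), 0 ≤ cid →
      pvAFin ((PySem.List.enumerate rest i).foldl pvAStep (g, f, some cid, start, count)) =
        (g ++ start :: (count + ((rest.takeWhile (fun x => x == some cid)).length : Int)) ::
            (pvBGo (i + ((rest.takeWhile (fun x => x == some cid)).length : Int))
              (rest.dropWhile (fun x => x == some cid))).1,
         f ++ cid ::
            (pvBGo (i + ((rest.takeWhile (fun x => x == some cid)).length : Int))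
              (rest.dropWhile (fun x => x == some cid))).2)) := by
  induction rest with
  | nil =>
    constructor
    · intro g f s c i; simp [PySem.List.enumerate, pvAFin, pvBGo]
    · intro g f cid start count i _; simp [PySem.List.enumerate, pvAFin, pvBGo]
  | cons h t ih =>
    obtain ⟨ih1, ih2⟩ := ih
    constructor
    · intro g f s c i
      rw [PySem.List.enumerate_cons]
      match h with
      | none => simp only [List.foldl_cons, pvAStep, pvBGo]; exact ih1 g f s c (i+1)
      | some v =>
        by_cases hv : v < 0
        · simp only [List.foldl_cons, pvAStep, if_pos hv, pvBGo]
          exact ih1 g f s c (i+1)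
        · simp only [List.foldl_cons, pvAStep, if_neg hv]
          rw [ih2 g f v i 1 (i+1) (by omega)]
          simp only [pvBGo]
          rw [if_neg hv]
          simp only [Prod.mk.injEq]
          refine ⟨?_, trivial⟩
          have h2 : i + 1 + ((t.takeWhile (fun x => x == some v)).length : Int) - i
              = 1 + ((t.takeWhile (fun x => x == some v)).length : Int) := by ring
          rw [h2]
    · intro g f cid start count i hcid
      rw [PySem.List.enumerate_cons]
      match h with
      | none =>
        simp only [List.foldl_cons, pvAStep]
        rw [ih1 (g ++ [start, count]) (f ++ [cid]) start 0 (i+1)]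
        simp [pvBGo_none]
      | some v =>
        by_cases hv : v < 0
        · have hne : (some v == some cid) = false := by
            simp only [beq_eq_false_iff_ne, ne_eq, Option.some.injEq]; omega
          simp only [List.foldl_cons, pvAStep, if_pos hv]
          rw [ih1 (g ++ [start, count]) (f ++ [cid]) start 0 (i+1)]
          simp [hne, pvBGo_sneg hv]
        · by_cases hvc : v = cid
          · subst hvc
            have heq : ((fun x => x == some v) (some v)) = true := by simp
            simp only [List.foldl_cons, pvAStep, if_neg hv, if_true]
            rw [ih2 g f v start (count + 1) (i+1) hcid]
            simp only [List.takeWhile_cons, List.dropWhile_cons, heq, if_true, List.length_cons]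
            simp only [Prod.mk.injEq]
            push_cast
            constructor
            · have e1 : count + 1 + ((t.takeWhile (fun x => x == some v)).length : Int)
                  = count + (((t.takeWhile (fun x => x == some v)).length : Int) + 1) := by ring
              have e2 : i + 1 + ((t.takeWhile (fun x => x == some v)).length : Int)
                  = i + (((t.takeWhile (fun x => x == some v)).length : Int) + 1) := by ring
              rw [e1, e2]
            · have e2 : i + 1 + ((t.takeWhile (fun x => x == some v)).length : Int)
                  = i + (((t.takeWhile (fun x => x == some v)).length : Int) + 1) := by ring
              rw [e2]
          · have hne : (some v == some cid) = false := by
              simp only [beq_eq_false_iff_ne, ne_eq, Option.some.injEq]; exact hvc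
            simp only [List.foldl_cons, pvAStep, if_neg hv, if_neg hvc]
            rw [ih2 (g ++ [start, count]) (f ++ [cid]) v i 1 (i+1) (by omega)]
            simp only [List.takeWhile_cons, List.dropWhile_cons, hne, Bool.false_eq_true,
              if_false, List.length_nil, pvBGo]
            rw [if_neg hv]
            simp only [Prod.mk.injEq, List.append_assoc, List.cons_append, List.nil_append,
              Int.natCast_zero, add_zero]
            refine ⟨?_, trivial⟩
            have h2 : i + 1 + ((t.takeWhile (fun x => x == some v)).length : Int) - i
                = 1 + ((t.takeWhile (fun x => x == some v)).length : Int) := by ring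
            rw [h2]

theorem compress_loop_face_ids_py_spec : Claim_equal_compress_loop_face_ids_py := by
  intro xs _
  unfold Spec_compress_loop_face_ids_py compress_loop_face_ids_py compress_loop_face_ids_py_alt
  simpa using (pv_main xs).1 [] [] 0 0 0
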